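-- pv_equiv track=rewrite | github.com/Swirl86/AdventOfCode | AdventOfCode2024/Day11/part1a2.py | simulate_stones
-- ===== SOURCE A (Python) =====
-- from collections import Counter # More memory-efficient
--
-- def simulate_stones(stones, blinks):
--     """
--     Simulate the process of stones evolving based on specified rules over multiple blinks.
--
--     Args:
--         stones (Counter): A Counter containing the current stones and their quantities.
--         blinks (int): The number of times the stones should evolve according to the rules.
--
--     Returns:
--         Counter: The updated stones and their quantities after the specified number of blinks.
--     """
--     for _ in range(blinks):
--         new_stones = Counter()
--         for stone, qty in stones.items():  # Iterate through current stones and their quantities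
--             if stone == 0:
--                 # Rule 1: If the stone is 0, it becomes 1
--                 new_stones[1] += qty
--             elif len(str(stone)) % 2 == 0:
--                 # Rule 2: If the stone has an even number of digits, split it into two stones
--                 num_str = str(stone)
--                 mid = len(num_str) // 2
--                 left = int(num_str[:mid])
--                 right = int(num_str[mid:])
--                 new_stones[left] += qty
--                 new_stones[right] += qty
--             else:
--                 # Rule 3: If the stone has an odd number of digits, multiply it by 2024
--                 new_stones[stone * 2024] += qty
--         stones = new_stones
--     return stones
-- ===== SOURCE B (Python) =====
-- from collections import Counter
--
--
-- def _split(v):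
--     if v == 0:
--         return (1,)
--     s = str(v)
--     if len(s) % 2 == 0:
--         m = len(s) // 2
--         return (int(s[:m]), int(s[m:]))
--     return (v * 2024,)
--
--
-- def simulate_stones(stones, blinks):
--     # Phase 1: unfold the layered graph of distinct stone values (no counts),
--     # caching the rule once per distinct value across all levels.
--     values = list(stones.keys())
--     cache = {}
--     layers = []          # per blink: (rows of child indices, size of next level)
--     for _ in range(blinks):
--         nvalues, nindex, rows = [], {}, []
--         for v in values:
--             kids = cache.get(v)
--             if kids is None:
--                 kids = _split(v)
--                 cache[v] = kids
--             row = []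
--             for c in kids:
--                 j = nindex.get(c)
--                 if j is None:
--                     j = len(nvalues)
--                     nindex[c] = j
--                     nvalues.append(c)
--                 row.append(j)
--             rows.append(row)
--         layers.append((rows, len(nvalues)))
--         values = nvalues
--     # Phase 2: push the quantity vector through the graph, level by level.
--     counts = list(stones.values())
--     for rows, size in layers:
--         ncounts = [0] * size
--         for qty, row in zip(counts, rows):
--             for j in row:
--                 ncounts[j] += qty
--         counts = ncounts
--     return Counter(dict(zip(values, counts)))
-- ===== Notes on version B (the rewrite author's own statement) =====
-- stated objective: alternative
-- what changed: B separates structure from counting: phase 1 unfolds the layered graph of distinct stone values (the digit rule evaluated once per distinct value, children recorded as integer indices into the next level), phase 2 then pushes the quantity vector through that index graph with plain list arithmetic; A instead fuses both, rebuilding a Counter per blink with the rule applied inline to every entry.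
-- outside the precondition, e.g. on simulate_stones({-12: 1}, 1): A returns {-24288: 1}, B returns {-24288: 1}; on simulate_stones({-1: 1}, 1): A raises ValueError, B raises ValueError
import Mathlib
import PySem

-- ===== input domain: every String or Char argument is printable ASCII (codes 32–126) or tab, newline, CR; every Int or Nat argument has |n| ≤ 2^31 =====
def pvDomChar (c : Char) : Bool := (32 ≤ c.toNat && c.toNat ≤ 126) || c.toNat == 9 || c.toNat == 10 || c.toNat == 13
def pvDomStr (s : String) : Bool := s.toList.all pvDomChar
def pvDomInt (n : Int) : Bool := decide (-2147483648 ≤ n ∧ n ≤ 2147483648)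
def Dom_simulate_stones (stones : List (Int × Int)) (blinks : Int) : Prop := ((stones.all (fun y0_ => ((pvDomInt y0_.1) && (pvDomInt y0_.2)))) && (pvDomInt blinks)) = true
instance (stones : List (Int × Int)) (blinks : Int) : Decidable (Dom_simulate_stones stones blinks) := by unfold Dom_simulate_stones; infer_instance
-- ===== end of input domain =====

-- B is a two-phase algorithm: it first unfolds the layered graph of DISTINCT stone values
-- (child indices per level, the digit rule evaluated once per distinct value), then pushes the
-- quantity vector through that index graph with plain list arithmetic; A instead rebuilds a
-- count dict per blink with the rule applied inline. Equality of the returned association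
-- lists (order included) is proved on all admitted inputs.

-- ===== PORT A =====
def simulate_stones (stones : List (Int × Int)) (blinks : Int) : List (Int × Int) :=
  ((List.range blinks.toNat).foldl (fun (st : PySem.Dict Int Int) _ =>
      st.items.foldl (fun (new_stones : PySem.Dict Int Int) p =>
        if p.1 = 0 then
          -- Rule 1: new_stones[1] += qty
          new_stones.modify 1 0 (· + p.2)
        else if PySem.Int.mod (PySem.Str.len (PySem.Int.toStr p.1)) 2 = 0 then
          -- Rule 2: split the digit string in two halves
          let num_str := PySem.Int.toStr p.1
          let mid := PySem.Int.floordiv (PySem.Str.len num_str) 2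
          -- int(num_str[:mid]) / int(num_str[mid:]); Python raises ValueError where ofStr? is none (outside Pre_)
          let left := (PySem.Int.ofStr? (PySem.Str.slice num_str none (some mid))).getD 0
          let right := (PySem.Int.ofStr? (PySem.Str.slice num_str (some mid) none)).getD 0
          (new_stones.modify left 0 (· + p.2)).modify right 0 (· + p.2)
        else
          -- Rule 3: new_stones[stone * 2024] += qty
          new_stones.modify (p.1 * 2024) 0 (· + p.2))
        PySem.Dict.empty)
    (PySem.Dict.ofList stones)).items

-- ===== PORT B =====
-- helper _split of Source B
def split_alt (v : Int) : List Int :=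
  if v = 0 then [1]
  else
    let s := PySem.Int.toStr v
    if PySem.Int.mod (PySem.Str.len s) 2 = 0 then
      let m := PySem.Int.floordiv (PySem.Str.len s) 2
      -- int(s[:m]) / int(s[m:]); Python raises ValueError where ofStr? is none (outside Pre_)
      [(PySem.Int.ofStr? (PySem.Str.slice s none (some m))).getD 0,
       (PySem.Int.ofStr? (PySem.Str.slice s (some m) none)).getD 0]
    else [v * 2024]

-- phase 1, inner loop "for c in kids": state (nvalues, nindex, row)
def chStep (s : List Int × PySem.Dict Int Nat × List Nat) (c : Int) :
    List Int × PySem.Dict Int Nat × List Nat :=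
  match s.2.1.get? c with
  | some j => (s.1, s.2.1, s.2.2 ++ [j])
  | none => (s.1 ++ [c], s.2.1.insert c s.1.length, s.2.2 ++ [s.1.length])

-- phase 1, loop "for v in values": state (nvalues, nindex, rows, cache)
def parStep (s : List Int × PySem.Dict Int Nat × List (List Nat) × PySem.Dict Int (List Int))
    (v : Int) : List Int × PySem.Dict Int Nat × List (List Nat) × PySem.Dict Int (List Int) :=
  let kc : List Int × PySem.Dict Int (List Int) :=
    match s.2.2.2.get? v with
    | some k => (k, s.2.2.2)
    | none => (split_alt v, s.2.2.2.insert v (split_alt v))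
  let r := kc.1.foldl chStep (s.1, s.2.1, ([] : List Nat))
  (r.1, r.2.1, s.2.2.1 ++ [r.2.2], kc.2)

-- phase 1, one level: state (values, layers, cache)
def levelStep (st : List Int × List (List (List Nat) × Nat) × PySem.Dict Int (List Int)) :
    List Int × List (List (List Nat) × Nat) × PySem.Dict Int (List Int) :=
  let r := st.1.foldl parStep
    (([] : List Int), (PySem.Dict.empty : PySem.Dict Int Nat),
     ([] : List (List Nat)), st.2.2)
  (r.1, st.2.1 ++ [(r.2.2.1, r.1.length)], r.2.2.2)

-- phase 2, one level: push the count vector through the stored index rows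
def applyLayer (counts : List Int) (layer : List (List Nat) × Nat) : List Int :=
  (counts.zip layer.1).foldl
    (fun w qr => qr.2.foldl (fun w j => w.set j (w.getD j 0 + qr.1)) w)
    (List.replicate layer.2 0)

def simulate_stones_alt (stones : List (Int × Int)) (blinks : Int) : List (Int × Int) :=
  let d := PySem.Dict.ofList stones
  let ph := (List.range blinks.toNat).foldl (fun st _ => levelStep st)
    (d.keys, ([] : List (List (List Nat) × Nat)),
     (PySem.Dict.empty : PySem.Dict Int (List Int)))
  let counts := ph.2.1.foldl applyLayer d.values
  (PySem.Dict.ofList (ph.1.zip counts)).items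

-- ===== PRECONDITION & SPEC =====
-- Pre_ excludes negative stone values when blinks > 0: there A's digit-split rule can raise
-- ValueError (int('-')), and whether it actually does depends on the whole evolution rather
-- than on any closed-form input condition, so all such inputs are excluded.
def Pre_simulate_stones (stones : List (Int × Int)) (blinks : Int) : Prop :=
  blinks ≤ 0 ∨ ∀ p ∈ stones, 0 ≤ p.1
instance (stones : List (Int × Int)) (blinks : Int) : Decidable (Pre_simulate_stones stones blinks) := by
  unfold Pre_simulate_stones; infer_instance

def pvWitness_simulate_stones : (List (Int × Int)) × Int := ([(0, 1), (23, 2)], 3)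

def Spec_simulate_stones (stones : List (Int × Int)) (blinks : Int) (out : List (Int × Int)) : Prop := out = simulate_stones_alt stones blinks
instance (stones : List (Int × Int)) (blinks : Int) (out : List (Int × Int)) : Decidable (Spec_simulate_stones stones blinks out) := by unfold Spec_simulate_stones; infer_instance

-- ===== CLAIM (what is proved, stated in full; the proofs are below) =====
def Claim_equal_simulate_stones : Prop := ∀ (stones : List (Int × Int)) (blinks : Int), Dom_simulate_stones stones blinks → Pre_simulate_stones stones blinks → Spec_simulate_stones stones blinks (simulate_stones stones blinks)

-- ===== LEMMAS AND PROOFS =====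

-- the weighted child pairs one count-entry contributes to the next blink
def childrenOf (p : Int × Int) : List (Int × Int) := (split_alt p.1).map (fun c => (c, p.2))
-- aggregate a weighted pair list into a counts dict ("d[k] = d.get(k, 0) + q")
def gfold (c : PySem.Dict Int Int) (P : List (Int × Int)) : PySem.Dict Int Int :=
  P.foldl (fun c q => c.insert q.1 (c.getD q.1 0 + q.2)) c
-- the canonical single blink both programs compute
def blinkD (st : PySem.Dict Int Int) : PySem.Dict Int Int :=
  gfold PySem.Dict.empty (st.items.flatMap childrenOf)
-- the rule-memo dict only ever caches _split results
def RInv (r : PySem.Dict Int (List Int)) : Prop :=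
  ∀ s l, r.get? s = some l → l = split_alt s
-- the per-level index dict maps a value to its position in nvalues, and knows all of nvalues
def IxInv (keys : List Int) (ni : PySem.Dict Int Nat) : Prop :=
  (∀ x j, ni.get? x = some j → ∃ h : j < keys.length, keys[j] = x) ∧
  (∀ x, ni.get? x = none → x ∉ keys)

lemma gfoldfold_flat {α : Type} (f : α → List (Int × Int)) (L : List α) :
    ∀ (c : PySem.Dict Int Int), L.foldl (fun c k => gfold c (f k)) c = gfold c (L.flatMap f) := by
  induction L with
  | nil => intro c; rfl
  | cons x L ih =>
    intro c
    rw [List.flatMap_cons, gfold, List.foldl_append]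
    exact ih _

-- ----- port A computes blinkD each blink -----
lemma split_zero : split_alt 0 = [1] := by
  simp [split_alt]

lemma split_even {s : Int} (hs : ¬ s = 0)
    (hev : PySem.Int.mod (PySem.Str.len (PySem.Int.toStr s)) 2 = 0) :
    split_alt s =
      [(PySem.Int.ofStr? (PySem.Str.slice (PySem.Int.toStr s) none
          (some (PySem.Int.floordiv (PySem.Str.len (PySem.Int.toStr s)) 2)))).getD 0,
       (PySem.Int.ofStr? (PySem.Str.slice (PySem.Int.toStr s)
          (some (PySem.Int.floordiv (PySem.Str.len (PySem.Int.toStr s)) 2)) none)).getD 0] := by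
  simp only [split_alt, if_neg hs]
  rw [if_pos hev]

lemma split_odd {s : Int} (hs : ¬ s = 0)
    (hev : ¬ PySem.Int.mod (PySem.Str.len (PySem.Int.toStr s)) 2 = 0) :
    split_alt s = [s * 2024] := by
  simp only [split_alt, if_neg hs]
  rw [if_neg hev]

lemma one_modify (nd : PySem.Dict Int Int) (a q : Int) :
    nd.modify a 0 (· + q) = gfold nd [(a, q)] := rfl

lemma two_modify (nd : PySem.Dict Int Int) (a b q : Int) :
    (nd.modify a 0 (· + q)).modify b 0 (· + q) = gfold nd [(a, q), (b, q)] := rfl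

lemma bodyA_eq (nd : PySem.Dict Int Int) (p : Int × Int) :
    (if p.1 = 0 then nd.modify 1 0 (· + p.2)
     else if PySem.Int.mod (PySem.Str.len (PySem.Int.toStr p.1)) 2 = 0 then
       let num_str := PySem.Int.toStr p.1
       let mid := PySem.Int.floordiv (PySem.Str.len num_str) 2
       let left := (PySem.Int.ofStr? (PySem.Str.slice num_str none (some mid))).getD 0
       let right := (PySem.Int.ofStr? (PySem.Str.slice num_str (some mid) none)).getD 0
       (nd.modify left 0 (· + p.2)).modify right 0 (· + p.2)
     else nd.modify (p.1 * 2024) 0 (· + p.2))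
    = gfold nd (childrenOf p) := by
  obtain ⟨s, q⟩ := p
  show _ = gfold nd ((split_alt s).map (fun c => (c, q)))
  by_cases hs : s = 0
  · rw [if_pos hs, hs, split_zero, List.map_cons, List.map_nil]
    exact one_modify nd 1 q
  · rw [if_neg hs]
    by_cases hev : PySem.Int.mod (PySem.Str.len (PySem.Int.toStr s)) 2 = 0
    · rw [if_pos hev, split_even hs hev, List.map_cons, List.map_cons, List.map_nil]
      exact two_modify nd _ _ q
    · rw [if_neg hev, split_odd hs hev, List.map_cons, List.map_nil]
      exact one_modify nd _ q

lemma range_foldl_iterate {σ : Type} (f : σ → σ) :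
    ∀ (n : Nat) (d : σ), (List.range n).foldl (fun st _ => f st) d = f^[n] d := by
  intro n
  induction n with
  | zero => intro d; rfl
  | succ n ih =>
    intro d
    rw [List.range_succ, List.foldl_append, ih, Function.iterate_succ_apply']
    rfl

lemma a_eq (stones : List (Int × Int)) (blinks : Int) :
    simulate_stones stones blinks = (blinkD^[blinks.toNat] (PySem.Dict.ofList stones)).items := by
  rw [simulate_stones, ← range_foldl_iterate]
  refine congrArg PySem.Dict.items (List.foldl_ext _ _ _ ?_)
  intro d _ _
  rw [blinkD, ← gfoldfold_flat]
  exact List.foldl_ext _ _ _ (fun nd p _ => bodyA_eq nd p)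

-- ----- facts about the aggregation dict -----
lemma gfold_cons (c : PySem.Dict Int Int) (p : Int × Int) (P : List (Int × Int)) :
    gfold c (p :: P) = gfold (c.insert p.1 (c.getD p.1 0 + p.2)) P := rfl

lemma gfold_append (c : PySem.Dict Int Int) (P Q : List (Int × Int)) :
    gfold c (P ++ Q) = gfold (gfold c P) Q := by
  unfold gfold; exact List.foldl_append

lemma nodup_keys_gfold (P : List (Int × Int)) (c : PySem.Dict Int Int) (h : c.keys.Nodup) :
    (gfold c P).keys.Nodup := by
  unfold gfold
  exact PySem.Dict.nodup_keys_foldl_insert_key P (fun q => q.1)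
    (fun d x => d.getD x.1 0 + x.2) c h

lemma size_le_gfold (P : List (Int × Int)) : ∀ (c : PySem.Dict Int Int),
    c.size ≤ (gfold c P).size := by
  induction P with
  | nil => intro c; exact le_refl _
  | cons p P ih =>
    intro c
    rw [gfold_cons]
    refine le_trans ?_ (ih _)
    rw [PySem.Dict.size_insert]
    split_ifs <;> omega

lemma nodup_keys_blinkD (d : PySem.Dict Int Int) : (blinkD d).keys.Nodup := by
  unfold blinkD
  refine nodup_keys_gfold _ _ ?_
  simp [PySem.Dict.keys_empty]

lemma nodup_keys_blinkD_iter (k : Nat) (d : PySem.Dict Int Int) (hnd : d.keys.Nodup) :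
    (blinkD^[k] d).keys.Nodup := by
  cases k with
  | zero => exact hnd
  | succ n => rw [Function.iterate_succ_apply']; exact nodup_keys_blinkD _

-- overwriting the unique occurrence of key k (at position j) edits the values list in place
lemma overwrite_values : ∀ (l : List (Int × Int)) (j : Nat) (hj : j < l.length) (k v : Int),
    (l.map (·.1)).Nodup → (l[j]'hj).1 = k →
    (l.map (fun p => if p.1 == k then (k, v) else p)).map (·.2) = (l.map (·.2)).set j v := by
  intro l
  induction l with
  | nil => intro j hj; simp at hj
  | cons p l ih =>
    intro j hj k v hnd hk
    rw [List.map_cons, List.nodup_cons] at hnd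
    rw [List.map_cons, List.map_cons]
    cases j with
    | zero =>
      simp only [List.getElem_cons_zero] at hk
      have hif : (if (p.1 == k) = true then (k, v) else p) = (k, v) := by
        rw [if_pos (beq_iff_eq.mpr hk)]
      rw [hif, List.map_cons, List.set_cons_zero]
      congr 1
      rw [List.map_map]
      refine List.map_congr_left ?_
      intro q hq
      have hqk : q.1 ≠ k := by
        intro he
        refine hnd.1 ?_
        rw [← hk] at he
        exact he ▸ List.mem_map_of_mem hq
      simp [Function.comp, hqk]
    | succ j =>
      simp only [List.length_cons, Nat.add_lt_add_iff_right] at hj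
      simp only [List.getElem_cons_succ] at hk
      have hpk : p.1 ≠ k := by
        intro he
        refine hnd.1 ?_
        rw [he, ← hk]
        exact List.mem_map_of_mem (List.getElem_mem hj)
      have hif : (if (p.1 == k) = true then (k, v) else p) = p := by
        rw [if_neg]
        simp [hpk]
      rw [hif, List.map_cons, List.set_cons_succ]
      congr 1
      exact ih j hj k v hnd.2 hk

-- (d.insert k v) for a key already at position j sets position j of the values
lemma values_insert_at (c : PySem.Dict Int Int) (j : Nat) (hj : j < c.keys.length)
    (k v : Int) (hnd : c.keys.Nodup) (hk : c.keys[j]'hj = k)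
    (hc : c.contains k = true) :
    (c.insert k v).values = c.values.set j v := by
  have hj' : j < c.items.length := by simpa [PySem.Dict.keys] using hj
  have hk' : (c.items[j]'hj').1 = k := by
    have : c.keys[j]'hj = (c.items[j]'hj').1 := by
      simp [PySem.Dict.keys]
    rw [← this, hk]
  have hnd' : (c.items.map (·.1)).Nodup := by
    simpa [PySem.Dict.keys] using hnd
  show (c.insert k v).items.map (·.2) = (c.items.map (·.2)).set j v
  rw [PySem.Dict.items_insert_of_contains c v hc]
  exact overwrite_values c.items j hj' k v hnd' hk'

lemma values_getD (c : PySem.Dict Int Int) (hnd : c.keys.Nodup) (j : Nat)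
    (hj : j < c.keys.length) :
    c.values.getD j 0 = c.getD (c.keys[j]'hj) 0 := by
  rw [PySem.Dict.values_eq_map_keys c hnd 0, List.getD_eq_getElem?_getD, List.getElem?_map,
    List.getElem?_eq_getElem hj]
  rfl

lemma length_values_keys (c : PySem.Dict Int Int) : c.values.length = c.keys.length := by
  simp [PySem.Dict.values, PySem.Dict.keys]

-- ----- phase 1 + phase 2: the inner loop over one parent's kids -----
lemma kids_loop (ks : List Int) : ∀ (c : PySem.Dict Int Int) (ni : PySem.Dict Int Nat)
    (row0 : List Nat) (vec : List Int) (t : Nat) (q : Int),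
    c.keys.Nodup → IxInv c.keys ni → vec = c.values ++ List.replicate t 0 →
    (gfold c (ks.map (fun k => (k, q)))).size ≤ c.size + t →
    ∃ ni' row1 t',
      ks.foldl chStep (c.keys, ni, row0)
        = ((gfold c (ks.map (fun k => (k, q)))).keys, ni', row0 ++ row1) ∧
      IxInv (gfold c (ks.map (fun k => (k, q)))).keys ni' ∧
      (gfold c (ks.map (fun k => (k, q)))).keys.Nodup ∧
      row1.foldl (fun w j => w.set j (w.getD j 0 + q)) vec
        = (gfold c (ks.map (fun k => (k, q)))).values ++ List.replicate t' 0 ∧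
      (gfold c (ks.map (fun k => (k, q)))).size + t' = c.size + t := by
  induction ks with
  | nil =>
    intro c ni row0 vec t q hnd hix hvec _
    exact ⟨ni, [], t, by simp [gfold], by simpa [gfold] using hix,
      by simpa [gfold] using hnd, by simpa [gfold] using hvec, by simp [gfold]⟩
  | cons k0 ks ih =>
    intro c ni row0 vec t q hnd hix hvec hsz
    rw [List.map_cons, gfold_cons] at hsz ⊢
    set c1 := c.insert k0 (c.getD k0 0 + q) with hc1
    rw [List.foldl_cons]
    cases hni : ni.get? k0 with
    | some j =>
      -- known value: overwrite position j
      obtain ⟨hj, hkj⟩ := hix.1 k0 j hni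
      have hmem : k0 ∈ c.keys := hkj ▸ List.getElem_mem hj
      have hcon : c.contains k0 = true := (PySem.Dict.contains_iff_mem_keys _ _).2 hmem
      have hkeys1 : c1.keys = c.keys := PySem.Dict.keys_insert_of_contains c _ hcon
      have hsz1 : c1.size = c.size := by
        rw [hc1, PySem.Dict.size_insert, if_pos hcon]
      have hstep : chStep (c.keys, ni, row0) k0 = (c.keys, ni, row0 ++ [j]) := by
        simp [chStep, hni]
      rw [hstep]
      have hix1 : IxInv c1.keys ni := hkeys1 ▸ hix
      have hnd1 : c1.keys.Nodup := hkeys1 ▸ hnd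
      -- the new vector matches c1
      have hjv : j < c.values.length := by rw [length_values_keys]; exact hj
      have hget : vec.getD j 0 = c.getD k0 0 := by
        rw [hvec, List.getD_eq_getElem?_getD, List.getElem?_append_left hjv]
        rw [← List.getD_eq_getElem?_getD, values_getD c hnd j hj, hkj]
      have hvec1 : vec.set j (vec.getD j 0 + q) = c1.values ++ List.replicate t 0 := by
        rw [hget, hvec, List.set_append, if_pos hjv]
        rw [values_insert_at c j hj k0 _ hnd hkj hcon]
      obtain ⟨ni', row1, t', h1, h2, h3, h4, h5⟩ :=
        ih c1 ni (row0 ++ [j]) (vec.set j (vec.getD j 0 + q)) t q hnd1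
          (hkeys1 ▸ hix) hvec1 (by rw [hsz1]; exact hsz)
      rw [hkeys1] at h1
      refine ⟨ni', j :: row1, t', ?_, h2, h3, ?_, by omega⟩
      · rw [h1, List.append_assoc]; rfl
      · rw [List.foldl_cons]; exact h4
    | none =>
      -- fresh value: append at position c.keys.length
      have hnotmem : k0 ∉ c.keys := hix.2 k0 hni
      have hcon : c.contains k0 = false := by
        cases hcc : c.contains k0 with
        | false => rfl
        | true => exact absurd ((PySem.Dict.contains_iff_mem_keys _ _).1 hcc) hnotmem
      have hitems1 : c1.items = c.items ++ [(k0, c.getD k0 0 + q)] :=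
        PySem.Dict.items_insert_of_not_contains c _ (by rw [hcon])
      have hkeys1 : c1.keys = c.keys ++ [k0] := by
        show c1.items.map (·.1) = _
        rw [hitems1]; simp [PySem.Dict.keys]
      have hvals1 : c1.values = c.values ++ [c.getD k0 0 + q] := by
        show c1.items.map (·.2) = _
        rw [hitems1]; simp [PySem.Dict.values]
      have hsz1 : c1.size = c.size + 1 := by
        rw [hc1, PySem.Dict.size_insert, if_neg (by rw [hcon]; exact Bool.false_ne_true)]
      have ht1 : 1 ≤ t := by
        have := size_le_gfold (ks.map (fun k => (k, q))) c1
        omega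
      have hgd0 : c.getD k0 0 = 0 := PySem.Dict.getD_of_not_contains c 0 hcon
      have hstep : chStep (c.keys, ni, row0) k0
          = (c.keys ++ [k0], ni.insert k0 c.keys.length, row0 ++ [c.keys.length]) := by
        simp [chStep, hni]
      rw [hstep]
      have hnd1 : c1.keys.Nodup := by
        rw [hkeys1]
        refine List.Nodup.append hnd (List.nodup_singleton _) ?_
        intro a ha hb
        rw [List.mem_singleton] at hb
        exact hnotmem (hb ▸ ha)
      have hix1 : IxInv c1.keys (ni.insert k0 c.keys.length) := by
        constructor
        · intro x jx hx
          rw [PySem.Dict.get?_insert] at hx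
          by_cases hxk : x = k0
          · rw [if_pos hxk] at hx
            cases hx
            subst hxk
            refine ⟨by rw [hkeys1]; simp, ?_⟩
            simp [hkeys1]
          · rw [if_neg hxk] at hx
            obtain ⟨hlt, he⟩ := hix.1 x jx hx
            refine ⟨by rw [hkeys1]; simp; omega, ?_⟩
            simp only [hkeys1]
            rw [List.getElem_append_left hlt]
            exact he
        · intro x hx
          rw [PySem.Dict.get?_insert] at hx
          by_cases hxk : x = k0
          · rw [if_pos hxk] at hx; cases hx
          · rw [if_neg hxk] at hx
            rw [hkeys1]
            intro hmem
            rcases List.mem_append.1 hmem with h | h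
            · exact hix.2 x hx h
            · simp only [List.mem_cons, List.not_mem_nil, or_false] at h
              exact hxk h
      -- the new vector: position c.keys.length was a zero of the padding
      have hlenv : c.values.length = c.keys.length := length_values_keys c
      have hget : vec.getD c.keys.length 0 = 0 := by
        rw [hvec, List.getD_eq_getElem?_getD, List.getElem?_append_right (by omega)]
        rw [hlenv, Nat.sub_self]
        cases t with
        | zero => omega
        | succ n => simp [List.replicate_succ]
      have hvec1 : vec.set c.keys.length (vec.getD c.keys.length 0 + q)
          = c1.values ++ List.replicate (t - 1) 0 := by
        rw [hget, hvec, List.set_append, if_neg (by omega), hlenv, Nat.sub_self, hvals1, hgd0]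
        cases t with
        | zero => omega
        | succ n =>
          simp [List.replicate_succ, List.append_assoc]
      obtain ⟨ni', row1, t', h1, h2, h3, h4, h5⟩ :=
        ih c1 (ni.insert k0 c.keys.length) (row0 ++ [c.keys.length])
          (vec.set c.keys.length (vec.getD c.keys.length 0 + q)) (t - 1) q hnd1 hix1 hvec1
          (by omega)
      rw [hkeys1] at h1
      refine ⟨ni', c.keys.length :: row1, t', ?_, h2, h3, ?_, by omega⟩
      · rw [h1, List.append_assoc]; rfl
      · rw [List.foldl_cons]; exact h4

-- ----- the loop over the parents of one level -----
lemma parents_loop (ps : List (Int × Int)) : ∀ (c : PySem.Dict Int Int)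
    (ni : PySem.Dict Int Nat) (rows0 : List (List Nat)) (cache : PySem.Dict Int (List Int))
    (vec : List Int) (t : Nat),
    c.keys.Nodup → IxInv c.keys ni → RInv cache →
    vec = c.values ++ List.replicate t 0 →
    c.size + t = (gfold c (ps.flatMap childrenOf)).size →
    ∃ ni' rows1 cache',
      ps.foldl (fun s p => parStep s p.1) (c.keys, ni, rows0, cache)
        = ((gfold c (ps.flatMap childrenOf)).keys, ni', rows0 ++ rows1, cache') ∧
      RInv cache' ∧
      ((ps.map (·.2)).zip rows1).foldl
        (fun w qr => qr.2.foldl (fun w j => w.set j (w.getD j 0 + qr.1)) w) vec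
        = (gfold c (ps.flatMap childrenOf)).values := by
  induction ps with
  | nil =>
    intro c ni rows0 cache vec t hnd hix hr hvec hsz
    rw [List.flatMap_nil] at hsz
    have ht : t = 0 := by
      simp only [gfold, List.foldl_nil] at hsz
      omega
    refine ⟨ni, [], cache, by simp [gfold], hr, ?_⟩
    simp only [List.map_nil, List.zip_nil_left, List.foldl_nil]
    rw [hvec, ht]
    simp [gfold]
  | cons p ps ih =>
    intro c ni rows0 cache vec t hnd hix hr hvec hsz
    rw [List.flatMap_cons, gfold_append] at hsz ⊢
    set c1 := gfold c (childrenOf p) with hc1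
    have hsz' : c1.size ≤ c.size + t := by
      have := size_le_gfold (ps.flatMap childrenOf) c1
      omega
    have hkmap : (split_alt p.1).map (fun k => (k, p.2)) = childrenOf p := rfl
    obtain ⟨ni1, row1, t1, h1, h2, h3, h4, h5⟩ :=
      kids_loop (split_alt p.1) c ni [] vec t p.2 hnd hix hvec
        (by rw [hkmap, ← hc1]; exact hsz')
    rw [hkmap, ← hc1] at h1 h2 h3 h4 h5
    rw [List.foldl_cons]
    -- the cache lookup yields split_alt p.1 either way, and RInv is preserved
    cases hg : cache.get? p.1 with
    | some k =>
      have hk : k = split_alt p.1 := hr p.1 k hg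
      have hpar : parStep (c.keys, ni, rows0, cache) p.1
          = (c1.keys, ni1, rows0 ++ [row1], cache) := by
        simp only [parStep, hg, hk, h1]
        rfl
      rw [hpar]
      obtain ⟨ni', rows1, cache', g1, g2, g3⟩ :=
        ih c1 ni1 (rows0 ++ [row1]) cache
          (row1.foldl (fun w j => w.set j (w.getD j 0 + p.2)) vec) t1 h3 h2 hr h4 (by omega)
      refine ⟨ni', row1 :: rows1, cache', ?_, g2, ?_⟩
      · rw [g1, List.append_assoc]; rfl
      · rw [List.map_cons, List.zip_cons_cons, List.foldl_cons]
        exact g3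
    | none =>
      have hrc : RInv (cache.insert p.1 (split_alt p.1)) := by
        intro s l hl
        rw [PySem.Dict.get?_insert] at hl
        by_cases hsp : s = p.1
        · rw [if_pos hsp] at hl
          cases hl
          subst hsp
          rfl
        · rw [if_neg hsp] at hl
          exact hr s l hl
      have hpar : parStep (c.keys, ni, rows0, cache) p.1
          = (c1.keys, ni1, rows0 ++ [row1], cache.insert p.1 (split_alt p.1)) := by
        simp only [parStep, hg, h1]
        rfl
      rw [hpar]
      obtain ⟨ni', rows1, cache', g1, g2, g3⟩ :=
        ih c1 ni1 (rows0 ++ [row1]) (cache.insert p.1 (split_alt p.1))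
          (row1.foldl (fun w j => w.set j (w.getD j 0 + p.2)) vec) t1 h3 h2 hrc h4 (by omega)
      refine ⟨ni', row1 :: rows1, cache', ?_, g2, ?_⟩
      · rw [g1, List.append_assoc]; rfl
      · rw [List.map_cons, List.zip_cons_cons, List.foldl_cons]
        exact g3

-- ----- one level of B is one blinkD step -----
lemma level_spec (d : PySem.Dict Int Int) (layers : List (List (List Nat) × Nat))
    (cache : PySem.Dict Int (List Int)) (hr : RInv cache) :
    ∃ rows1 cache',
      levelStep (d.keys, layers, cache)
        = ((blinkD d).keys, layers ++ [(rows1, (blinkD d).keys.length)], cache') ∧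
      RInv cache' ∧
      applyLayer d.values (rows1, (blinkD d).keys.length) = (blinkD d).values := by
  have hkeys : d.keys = d.items.map (·.1) := rfl
  have hfold : d.keys.foldl parStep
      (([] : List Int), (PySem.Dict.empty : PySem.Dict Int Nat),
       ([] : List (List Nat)), cache)
      = d.items.foldl (fun s p => parStep s p.1)
      (([] : List Int), (PySem.Dict.empty : PySem.Dict Int Nat),
       ([] : List (List Nat)), cache) := by
    rw [hkeys, List.foldl_map]
  have hempty_nodup : (PySem.Dict.empty : PySem.Dict Int Int).keys.Nodup := by
    simp [PySem.Dict.keys_empty]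
  have hempty_ix : IxInv (PySem.Dict.empty : PySem.Dict Int Int).keys
      (PySem.Dict.empty : PySem.Dict Int Nat) := by
    constructor
    · intro x j hx
      rw [PySem.Dict.get?_empty] at hx
      cases hx
    · intro x _
      simp [PySem.Dict.keys_empty]
  have hblink : gfold PySem.Dict.empty (d.items.flatMap childrenOf) = blinkD d := rfl
  obtain ⟨ni', rows1, cache', g1, g2, g3⟩ :=
    parents_loop d.items PySem.Dict.empty PySem.Dict.empty [] cache
      (List.replicate (blinkD d).size 0) (blinkD d).size hempty_nodup hempty_ix hr
      (by simp [PySem.Dict.values]; rfl)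
      (by rw [hblink]; simp [PySem.Dict.size_empty])
  rw [hblink] at g1 g3
  have hlen : (blinkD d).keys.length = (blinkD d).size := by
    simp [PySem.Dict.keys, PySem.Dict.size]
  have hek : (PySem.Dict.empty : PySem.Dict Int Int).keys = ([] : List Int) := rfl
  rw [hek] at g1
  refine ⟨rows1, cache', ?_, g2, ?_⟩
  · show (_, layers ++ [_], _) = _
    rw [hfold, g1]
    simp
  · rw [applyLayer, hlen]
    have hvals : d.values = d.items.map (·.2) := rfl
    rw [hvals]
    exact g3

-- ----- all levels -----
lemma levels_loop (k : Nat) (d : PySem.Dict Int Int) :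
    ∀ (layers0 : List (List (List Nat) × Nat)) (cache : PySem.Dict Int (List Int)),
    RInv cache →
    ∃ layers1 cache',
      (List.range k).foldl (fun st _ => levelStep st) (d.keys, layers0, cache)
        = ((blinkD^[k] d).keys, layers0 ++ layers1, cache') ∧ RInv cache' ∧
      layers1.foldl applyLayer d.values = (blinkD^[k] d).values := by
  induction k with
  | zero =>
    intro layers0 cache hr
    exact ⟨[], cache, by simp, hr, by simp⟩
  | succ n ih =>
    intro layers0 cache hr
    rw [List.range_succ, List.foldl_append]
    obtain ⟨layers1, cache', g1, g2, g3⟩ := ih layers0 cache hr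
    rw [g1, List.foldl_cons, List.foldl_nil]
    obtain ⟨rows1, cache'', e1, e2, e3⟩ :=
      level_spec (blinkD^[n] d) (layers0 ++ layers1) cache' g2
    rw [e1]
    refine ⟨layers1 ++ [(rows1, (blinkD (blinkD^[n] d)).keys.length)], cache'', ?_, e2, ?_⟩
    · rw [Function.iterate_succ_apply', List.append_assoc]
    · rw [List.foldl_append, g3, List.foldl_cons, List.foldl_nil, e3,
        Function.iterate_succ_apply']

lemma zip_keys_values (c : PySem.Dict Int Int) : c.keys.zip c.values = c.items := by
  show (c.items.map (·.1)).zip (c.items.map (·.2)) = c.items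
  simp [List.zip_map']

lemma ofList_items (l : List (Int × Int)) (hnd : (l.map (·.1)).Nodup) :
    (PySem.Dict.ofList l).items = l := by
  have h : PySem.Dict.ofList l
      = List.foldl (fun (d : PySem.Dict Int Int) (a : Int × Int) => d.insert a.1 a.2)
        PySem.Dict.empty l := rfl
  rw [h, PySem.Dict.items_foldl_insert_fresh l (·.1) (·.2) PySem.Dict.empty
    (fun a _ => PySem.Dict.contains_empty a.1) hnd]
  simp [show (PySem.Dict.empty : PySem.Dict Int Int).items = [] from rfl]

lemma alt_eq (stones : List (Int × Int)) (blinks : Int) :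
    simulate_stones_alt stones blinks = (blinkD^[blinks.toNat] (PySem.Dict.ofList stones)).items := by
  obtain ⟨layers1, cache', g1, _, g3⟩ :=
    levels_loop blinks.toNat (PySem.Dict.ofList stones) [] PySem.Dict.empty
      (fun s l hl => by rw [PySem.Dict.get?_empty] at hl; cases hl)
  have h0 : simulate_stones_alt stones blinks
      = (PySem.Dict.ofList
          ((((List.range blinks.toNat).foldl (fun st _ => levelStep st)
              ((PySem.Dict.ofList stones).keys, [], PySem.Dict.empty)).1).zip
           ((((List.range blinks.toNat).foldl (fun st _ => levelStep st)
              ((PySem.Dict.ofList stones).keys, [], PySem.Dict.empty)).2.1).foldl applyLayer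
              (PySem.Dict.ofList stones).values))).items := rfl
  rw [h0, g1]
  simp only [List.nil_append]
  rw [g3, zip_keys_values]
  refine ofList_items _ ?_
  show (blinkD^[blinks.toNat] (PySem.Dict.ofList stones)).keys.Nodup
  exact nodup_keys_blinkD_iter _ _ (PySem.Dict.nodup_keys_ofList stones)

-- ===== VERDICT (by name: the statement is the Claim_ definition above) =====
theorem simulate_stones_spec : Claim_equal_simulate_stones := by
  intro stones blinks _ _
  unfold Spec_simulate_stones
  rw [a_eq, alt_eq]
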